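-- pv_equiv track=rewrite | github.com/jeongdonggi/baekjoonstudy | 프로그래머스/0/181922. 수열과 구간 쿼리 4/수열과 구간 쿼리 4.py | solution
-- ===== SOURCE A (Python) =====
-- def solution(arr, queries):
--     answer = []
--     for query in queries:
--         s,e,k = query
--         for i in range(len(arr)):
--             if s <= i and i <= e and i % k == 0:
--                 arr[i] += 1
--     answer = arr
--     return answer
-- ===== SOURCE B (Python) =====
-- def solution(arr, queries):
--     n = len(arr)
--     for s, e, k in queries:
--         lo = max(s, 0)
--         hi = min(e, n - 1)
--         if lo <= hi:
--             m = abs(k)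
--             first = ((lo + m - 1) // m) * m  # smallest multiple of |k| that is >= lo
--             for i in range(first, hi + 1, m):
--                 arr[i] += 1
--     return arr
-- ===== Notes on version B (the rewrite author's own statement) =====
-- stated objective: faster
-- what changed: Instead of A's scan of every index per query, B clamps the query range to [max(s,0), min(e,n-1)], computes the first multiple of |k| in it by ceiling division, and steps directly over the multiples of |k| only, so non-matching indices are never visited.
import Mathlib
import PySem

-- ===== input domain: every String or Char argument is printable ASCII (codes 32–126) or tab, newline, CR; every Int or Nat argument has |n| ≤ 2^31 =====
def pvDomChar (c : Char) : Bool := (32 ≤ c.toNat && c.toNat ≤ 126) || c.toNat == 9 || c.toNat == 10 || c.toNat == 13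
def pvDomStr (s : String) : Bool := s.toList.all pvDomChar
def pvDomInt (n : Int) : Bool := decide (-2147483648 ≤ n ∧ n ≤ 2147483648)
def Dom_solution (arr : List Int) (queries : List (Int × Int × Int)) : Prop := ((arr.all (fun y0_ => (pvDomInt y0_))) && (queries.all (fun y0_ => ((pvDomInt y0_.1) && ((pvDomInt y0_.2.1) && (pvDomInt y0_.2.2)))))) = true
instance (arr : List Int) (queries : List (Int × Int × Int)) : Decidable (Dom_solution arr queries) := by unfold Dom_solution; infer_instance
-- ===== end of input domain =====

-- B replaces A's full per-query scan of all indices by direct arithmetic stepping over the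
-- multiples of |k| inside the clamped range [max(s,0), min(e,n-1)] (objective: faster).
-- Mutation note: both A and B mutate arr in place and return the same object; the theorems are about the return value.

-- ===== PORT A =====
-- inner 'for i in range(len(arr)): if s<=i and i<=e and i%k==0: arr[i] += 1'
def pvStepA (q : Int × Int × Int) (arr : List Int) : List Int :=
  (List.range arr.length).foldl
    (fun (a : List Int) (i : Nat) =>
      if q.1 ≤ (i : Int) ∧ (i : Int) ≤ q.2.1 ∧ PySem.Int.mod (i : Int) q.2.2 = 0 then
        a.set i (a.getD i 0 + 1)
      else a) arr

def solution (arr : List Int) (queries : List (Int × Int × Int)) : List Int :=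
  queries.foldl (fun a q => pvStepA q a) arr

-- ===== PORT B =====
-- 'lo = max(s,0); hi = min(e,n-1); if lo <= hi: m = abs(k); first = ((lo+m-1)//m)*m;
--  for i in range(first, hi+1, m): arr[i] += 1'  (all visited i satisfy 0 <= i < n)
def pvStepB (n : Int) (a : List Int) (q : Int × Int × Int) : List Int :=
  let lo := max q.1 0
  let hi := min q.2.1 (n - 1)
  if lo ≤ hi then
    let m := |q.2.2|
    let first := (PySem.Int.floordiv (lo + m - 1) m) * m
    (PySem.List.pyRange first (hi + 1) m).foldl
      (fun (a : List Int) (i : Int) => a.set i.toNat (a.getD i.toNat 0 + 1)) a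
  else a

def solution_alt (arr : List Int) (queries : List (Int × Int × Int)) : List Int :=
  queries.foldl (pvStepB (arr.length : Int)) arr

-- ===== PRECONDITION & SPEC =====
-- Pre_ excludes exactly the inputs where Python raises ZeroDivisionError: a query with k = 0
-- whose range [s,e] contains some valid index i < len(arr). Both A and B raise there.
def Pre_solution (arr : List Int) (queries : List (Int × Int × Int)) : Prop :=
  ∀ q ∈ queries, q.2.2 = 0 →
    ∀ i ∈ List.range arr.length, ¬(q.1 ≤ (i : Int) ∧ (i : Int) ≤ q.2.1)
instance (arr : List Int) (queries : List (Int × Int × Int)) : Decidable (Pre_solution arr queries) := by unfold Pre_solution; infer_instance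

def pvWitness_solution : List Int × (List (Int × Int × Int)) := ([3, 2, 4, 1], [(0, 2, 2), (1, 3, 1)])

def Spec_solution (arr : List Int) (queries : List (Int × Int × Int)) (out : List Int) : Prop := out = solution_alt arr queries
instance (arr : List Int) (queries : List (Int × Int × Int)) (out : List Int) : Decidable (Spec_solution arr queries out) := by unfold Spec_solution; infer_instance

-- ===== CLAIM =====
def Claim_equal_solution : Prop := ∀ (arr : List Int) (queries : List (Int × Int × Int)), Dom_solution arr queries → Pre_solution arr queries → Spec_solution arr queries (solution arr queries)

-- ===== LEMMAS AND PROOFS =====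

-- per-query indicator for index i
def pvInd (q : Int × Int × Int) (i : Int) : Int :=
  if q.1 ≤ i ∧ i ≤ q.2.1 ∧ PySem.Int.mod i q.2.2 = 0 then 1 else 0

theorem pv_sum_from (i : Int) (qs : List (Int × Int × Int)) (c : Int) :
    qs.foldl (fun s q => s + pvInd q i) c = c + qs.foldl (fun s q => s + pvInd q i) 0 := by
  induction qs generalizing c with
  | nil => simp
  | cons q qs ih =>
    simp only [List.foldl_cons]
    rw [ih (c + pvInd q i), ih (0 + pvInd q i)]
    ring

-- generic single pass over range n applying an index-local update g whose effect at j is +f j when j = i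
theorem pv_foldl_upd (f : Nat → Int) (g : List Int → Nat → List Int)
    (hlen : ∀ a i, (g a i).length = a.length)
    (hget : ∀ (a : List Int) (i j : Nat), j < a.length →
      (g a i).getD j 0 = a.getD j 0 + (if j = i then f i else 0)) :
    ∀ (n : Nat) (a : List Int),
      ((List.range n).foldl g a).length = a.length ∧
      ∀ j : Nat, j < a.length →
        ((List.range n).foldl g a).getD j 0 = a.getD j 0 + (if j < n then f j else 0) := by
  intro n
  induction n with
  | zero => intro a; simp
  | succ n ih =>
    intro a
    have h := ih a
    rw [List.range_succ, List.foldl_append]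
    simp only [List.foldl_cons, List.foldl_nil]
    constructor
    · rw [hlen, h.1]
    · intro j hj
      rw [hget _ n j (by rw [h.1]; exact hj), h.2 j hj]
      by_cases hjn : j = n
      · subst hjn; simp
      · by_cases hlt : j < n
        · simp [hjn, hlt, Nat.lt_succ_of_lt hlt]
        · have hns : ¬ j < n + 1 := by omega
          simp [hjn, hlt, hns]

theorem pv_stepA_getD (q : Int × Int × Int) (a : List Int) :
    (pvStepA q a).length = a.length ∧
    ∀ j : Nat, j < a.length → (pvStepA q a).getD j 0 = a.getD j 0 + pvInd q (j : Int) := by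
  unfold pvStepA
  have h := pv_foldl_upd (fun i => pvInd q (i : Int))
    (fun (a : List Int) (i : Nat) =>
      if q.1 ≤ (i : Int) ∧ (i : Int) ≤ q.2.1 ∧ PySem.Int.mod (i : Int) q.2.2 = 0 then
        a.set i (a.getD i 0 + 1)
      else a)
    (by intro a i; dsimp only; split <;> simp)
    (by
      intro a i j hj; dsimp only
      by_cases hc : q.1 ≤ (i : Int) ∧ (i : Int) ≤ q.2.1 ∧ PySem.Int.mod (i : Int) q.2.2 = 0
      · simp only [hc]
        by_cases hji : j = i
        · subst hji
          simp [List.getD, List.getElem?_set_self (by omega), pvInd, hc]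
        · simp [List.getD, List.getElem?_set_ne (by omega : i ≠ j), hji]
      · simp only [hc, if_false]
        by_cases hji : j = i
        · subst hji; simp [pvInd, hc]
        · simp [hji])
    a.length a
  exact ⟨h.1, fun j hj => by rw [h.2 j hj]; simp [hj]⟩

-- A's outer fold, elementwise
theorem pv_solution_getD (queries : List (Int × Int × Int)) (arr : List Int) :
    (solution arr queries).length = arr.length ∧
    ∀ j : Nat, j < arr.length →
      (solution arr queries).getD j 0 = arr.getD j 0 + queries.foldl (fun s q => s + pvInd q (j : Int)) 0 := by
  induction queries generalizing arr with
  | nil => simp [solution]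
  | cons q qs ih =>
    have hstep := pv_stepA_getD q arr
    have hrec := ih (pvStepA q arr)
    constructor
    · show (solution (pvStepA q arr) qs).length = arr.length
      rw [hrec.1, hstep.1]
    · intro j hj
      show (solution (pvStepA q arr) qs).getD j 0 = _
      rw [hrec.2 j (by rw [hstep.1]; exact hj), hstep.2 j hj]
      simp only [List.foldl_cons]
      rw [pv_sum_from (j : Int) qs (0 + pvInd q (j : Int))]
      ring

-- increment-at-index fold over an arbitrary Int index list: counts occurrences
theorem pv_countFold (L : List Int) (a : List Int)
    (hL : ∀ i ∈ L, 0 ≤ i ∧ i < (a.length : Int)) :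
    (L.foldl (fun (a : List Int) (i : Int) => a.set i.toNat (a.getD i.toNat 0 + 1)) a).length = a.length ∧
    ∀ j : Nat, j < a.length →
      (L.foldl (fun (a : List Int) (i : Int) => a.set i.toNat (a.getD i.toNat 0 + 1)) a).getD j 0
        = a.getD j 0 + (L.count (j : Int) : Int) := by
  induction L generalizing a with
  | nil => simp
  | cons i L ih =>
    have hi := hL i (by simp)
    have hset : ∀ j : Nat, j < a.length →
        (a.set i.toNat (a.getD i.toNat 0 + 1)).getD j 0
          = a.getD j 0 + (if (j : Int) = i then 1 else 0) := by
      intro j hj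
      by_cases hji : (j : Int) = i
      · have : j = i.toNat := by omega
        subst this
        simp [List.getD, List.getElem?_set_self (by omega), hji]
      · have hne : i.toNat ≠ j := by omega
        simp [List.getD, List.getElem?_set_ne hne, hji]
    have hrec := ih (a.set i.toNat (a.getD i.toNat 0 + 1))
      (by intro x hx; have := hL x (by simp [hx]); simpa using this)
    simp only [List.foldl_cons]
    refine ⟨by rw [hrec.1]; simp, ?_⟩
    intro j hj
    rw [hrec.2 j (by simpa using hj), hset j hj, List.count_cons]
    by_cases hji : (j : Int) = i
    · simp [hji]; ring
    · have hij : i ≠ (j : Int) := fun h => hji h.symm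
      simp [hji, hij]

-- the multiples list is duplicate-free (positive step)
theorem pv_nodup_pyRange (a b m : Int) (hm : 0 < m) :
    (PySem.List.pyRange a b m).Nodup := by
  rw [PySem.List.pyRange_of_pos a b hm]
  refine List.Nodup.map ?_ (List.nodup_range)
  intro x y hxy
  have : m * (x : Int) = m * (y : Int) := by linarith
  have := mul_left_cancel₀ (by omega : m ≠ 0) this
  exact_mod_cast this

-- membership in B's stepped range ↔ A's per-index condition (k ≠ 0)
theorem pv_mem_iff (q : Int × Int × Int) (n : Int) (j : Nat)
    (hj : (j : Int) < n) (hk : q.2.2 ≠ 0) :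
    ((j : Int) ∈ PySem.List.pyRange
        ((PySem.Int.floordiv ((max q.1 0) + |q.2.2| - 1) |q.2.2|) * |q.2.2|)
        ((min q.2.1 (n - 1)) + 1) |q.2.2|)
      ↔ (q.1 ≤ (j : Int) ∧ (j : Int) ≤ q.2.1 ∧ PySem.Int.mod (j : Int) q.2.2 = 0) := by
  set m := |q.2.2| with hmdef
  have hm : 0 < m := abs_pos.mpr hk
  set lo := max q.1 0 with hlo
  set first := (PySem.Int.floordiv (lo + m - 1) m) * m with hfirst
  have hdvd_first : m ∣ first := dvd_mul_left m _
  -- floordiv facts: lo ≤ first < lo + m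
  have hfd : PySem.Int.floordiv (lo + m - 1) m = (lo + m - 1) / m := by
    simp [PySem.Int.floordiv, Int.fdiv_eq_ediv_of_nonneg, Int.le_of_lt hm]
  have h1 := Int.ediv_add_emod (lo + m - 1) m
  have h2 := Int.emod_nonneg (lo + m - 1) (by omega : m ≠ 0)
  have h3 := Int.emod_lt_of_pos (lo + m - 1) hm
  have hcm : ((lo + m - 1) / m) * m = m * ((lo + m - 1) / m) := mul_comm _ _
  have hfirst_ge : lo ≤ first := by
    rw [hfirst, hfd]; omega
  have hfirst_lt : first < lo + m := by
    rw [hfirst, hfd]; omega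
  rw [PySem.List.mem_pyRange_iff_of_pos hm]
  have hmod : PySem.Int.mod (j : Int) q.2.2 = 0 ↔ m ∣ (j : Int) := by
    rw [PySem.Int.mod_eq_zero_iff_dvd, hmdef, abs_dvd]
  constructor
  · rintro ⟨hge, hlt, hdv⟩
    have hdj : m ∣ (j : Int) := by
      have := Dvd.dvd.add hdv hdvd_first
      simpa using this
    exact ⟨le_trans (le_trans (le_max_left _ _) hfirst_ge) hge,
      by omega, hmod.mpr hdj⟩
  · rintro ⟨hs, he, hmd⟩
    have hdj : m ∣ (j : Int) := hmod.mp hmd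
    have hdvd : m ∣ ((j : Int) - first) := Dvd.dvd.sub hdj hdvd_first
    have hjlo : lo ≤ (j : Int) := by rw [hlo]; omega
    have hge : first ≤ (j : Int) := by
      by_contra hcon
      simp only [not_le] at hcon
      have hneg : (j : Int) - first < 0 := by omega
      have hdvd' : m ∣ (first - (j : Int)) := by
        rw [show first - (j : Int) = -((j : Int) - first) by ring]
        exact dvd_neg.mpr hdvd
      have := Int.le_of_dvd (by omega) hdvd'
      omega
    exact ⟨hge, by omega, by simpa using hdvd⟩

-- B's per-query step, elementwise, under the query's no-ZeroDivision condition
theorem pv_stepB_getD (q : Int × Int × Int) (a : List Int) (n : Int) (hn : n = (a.length : Int))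
    (hq : q.2.2 = 0 → ∀ i ∈ List.range a.length, ¬(q.1 ≤ (i : Int) ∧ (i : Int) ≤ q.2.1)) :
    (pvStepB n a q).length = a.length ∧
    ∀ j : Nat, j < a.length → (pvStepB n a q).getD j 0 = a.getD j 0 + pvInd q (j : Int) := by
  unfold pvStepB
  by_cases hbr : max q.1 0 ≤ min q.2.1 (n - 1)
  · -- branch taken: k ≠ 0 inside Pre
    have hk : q.2.2 ≠ 0 := by
      intro hk0
      have hlo0 : (0 : Int) ≤ max q.1 0 := le_max_right _ _
      have hlt : max q.1 0 < n := by omega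
      have hmem : (max q.1 0).toNat ∈ List.range a.length := by
        simp [List.mem_range]; omega
      have := hq hk0 (max q.1 0).toNat hmem
      have hcast : ((max q.1 0).toNat : Int) = max q.1 0 := by omega
      rw [hcast] at this
      exact this ⟨le_max_left _ _, le_trans hbr (min_le_left _ _)⟩
    have hm : 0 < |q.2.2| := abs_pos.mpr hk
    simp only [hbr, if_pos]
    set L := PySem.List.pyRange
        ((PySem.Int.floordiv ((max q.1 0) + |q.2.2| - 1) |q.2.2|) * |q.2.2|)
        ((min q.2.1 (n - 1)) + 1) |q.2.2| with hL
    have hbound : ∀ i ∈ L, 0 ≤ i ∧ i < (a.length : Int) := by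
      intro i hiL
      rw [hL, PySem.List.mem_pyRange_iff_of_pos hm] at hiL
      obtain ⟨hge, hlt, -⟩ := hiL
      -- first ≥ lo ≥ 0 (same floordiv facts)
      have hfd : PySem.Int.floordiv ((max q.1 0) + |q.2.2| - 1) |q.2.2|
          = ((max q.1 0) + |q.2.2| - 1) / |q.2.2| := by
        simp [PySem.Int.floordiv, Int.fdiv_eq_ediv_of_nonneg, Int.le_of_lt hm]
      have h1 := Int.ediv_add_emod ((max q.1 0) + |q.2.2| - 1) |q.2.2|
      have h2 := Int.emod_nonneg ((max q.1 0) + |q.2.2| - 1) (by omega : |q.2.2| ≠ 0)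
      have h3 := Int.emod_lt_of_pos ((max q.1 0) + |q.2.2| - 1) hm
      have hcm : (((max q.1 0) + |q.2.2| - 1) / |q.2.2|) * |q.2.2|
          = |q.2.2| * (((max q.1 0) + |q.2.2| - 1) / |q.2.2|) := mul_comm _ _
      have hlo0 : (0 : Int) ≤ max q.1 0 := le_max_right _ _
      constructor
      · rw [hfd] at hge; omega
      · omega
    have h := pv_countFold L a hbound
    refine ⟨h.1, ?_⟩
    intro j hj
    rw [h.2 j hj]
    congr 1
    have hnd : L.Nodup := by rw [hL]; exact pv_nodup_pyRange _ _ _ hm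
    by_cases hmem : (j : Int) ∈ L
    · have hc := List.count_eq_one_of_mem hnd hmem
      have hcond := (pv_mem_iff q n j (by omega) hk).mp (hL ▸ hmem)
      simp [pvInd, hcond, hc]
    · have hc : L.count (j : Int) = 0 := List.count_eq_zero.mpr hmem
      have hcond : ¬(q.1 ≤ (j : Int) ∧ (j : Int) ≤ q.2.1 ∧ PySem.Int.mod (j : Int) q.2.2 = 0) := by
        intro hcon
        exact hmem (hL ▸ (pv_mem_iff q n j (by omega) hk).mpr hcon)
      simp [pvInd, hcond, hc]
  · -- branch skipped: the condition holds for no index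
    rw [if_neg hbr]
    refine ⟨rfl, ?_⟩
    intro j hj
    have hcond : ¬(q.1 ≤ (j : Int) ∧ (j : Int) ≤ q.2.1 ∧ PySem.Int.mod (j : Int) q.2.2 = 0) := by
      rintro ⟨hs, he, -⟩
      apply hbr
      have : max q.1 0 ≤ (j : Int) := by
        apply max_le hs (by positivity)
      have : (j : Int) ≤ min q.2.1 (n - 1) := by
        apply le_min he (by omega)
      omega
    simp [pvInd, hcond]

-- B's outer fold, elementwise
theorem pv_solution_alt_getD (queries : List (Int × Int × Int)) (arr : List Int) (n : Int)
    (hn : n = (arr.length : Int))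
    (hpre : ∀ q ∈ queries, q.2.2 = 0 →
      ∀ i ∈ List.range arr.length, ¬(q.1 ≤ (i : Int) ∧ (i : Int) ≤ q.2.1)) :
    (queries.foldl (pvStepB n) arr).length = arr.length ∧
    ∀ j : Nat, j < arr.length →
      (queries.foldl (pvStepB n) arr).getD j 0
        = arr.getD j 0 + queries.foldl (fun s q => s + pvInd q (j : Int)) 0 := by
  induction queries generalizing arr with
  | nil => simp
  | cons q qs ih =>
    have hstep := pv_stepB_getD q arr n hn (hpre q (by simp))
    have hrec := ih (pvStepB n arr q)
      (by rw [hstep.1]; exact hn)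
      (by intro q' hq'; have := hpre q' (by simp [hq']); rwa [hstep.1])
    simp only [List.foldl_cons]
    constructor
    · rw [hrec.1, hstep.1]
    · intro j hj
      rw [hrec.2 j (by rw [hstep.1]; exact hj), hstep.2 j hj]
      rw [pv_sum_from (j : Int) qs (0 + pvInd q (j : Int))]
      ring

-- ===== VERDICT =====
theorem solution_spec : Claim_equal_solution := by
  intro arr queries _ hpre
  show solution arr queries = solution_alt arr queries
  have hA := pv_solution_getD queries arr
  have hB : (solution_alt arr queries).length = arr.length ∧
      ∀ j : Nat, j < arr.length →
        (solution_alt arr queries).getD j 0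
          = arr.getD j 0 + queries.foldl (fun s q => s + pvInd q (j : Int)) 0 :=
    pv_solution_alt_getD queries arr (arr.length : Int) rfl hpre
  apply List.ext_getElem (by rw [hA.1]; exact hB.1.symm)
  intro j hjA hjB
  have hj : j < arr.length := by rw [hA.1] at hjA; exact hjA
  have h1 := hA.2 j hj
  have h2 := hB.2 j hj
  have e1 : (solution arr queries).getD j 0 = (solution arr queries)[j] := by
    simp [List.getD, List.getElem?_eq_getElem hjA]
  have e2 : (solution_alt arr queries).getD j 0 = (solution_alt arr queries)[j] := by
    simp [List.getD, List.getElem?_eq_getElem hjB]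
  rw [e1] at h1
  rw [e2] at h2
  rw [h1, h2]
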